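-- pv_equiv track=rewrite | github.com/tooooooooomy/competition-programming | at-coder-problems/karaoke.py | solve
-- ===== SOURCE A (Python) =====
-- def solve(n, m, a):
--     s_n = []
--     for i in range(n):
--         s = []
--         j = 0
--         while j < m-1:
--             k = j + 1
--             while k < m:
--                 s.append(max(a[i][j], a[i][k]))
--                 k += 1
--             j += 1
--         s_n.append(s)
--
--     s_2 = [0] * len(s_n[0])
--     for s in s_n:
--         for i in range(len(s_n[0])):
--             s_2[i] += s[i]
--
--     return max(s_2)
-- ===== SOURCE B (Python) =====
-- def solve(n, m, a):
--     totals = [sum(max(a[i][j], a[i][k]) for i in range(n))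
--               for j in range(m - 1)
--               for k in range(j + 1, m)]
--     return max(totals)
-- ===== Notes on version B (the rewrite author's own statement) =====
-- stated objective: simpler
-- what changed: Drops A's two-phase structure (build the full per-row table of pairwise maxima, then column-sum it, then take the max) in favour of one direct comprehension that, per column pair (j,k), sums max(a[i][j],a[i][k]) over the rows and takes the max of those totals.
import Mathlib
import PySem

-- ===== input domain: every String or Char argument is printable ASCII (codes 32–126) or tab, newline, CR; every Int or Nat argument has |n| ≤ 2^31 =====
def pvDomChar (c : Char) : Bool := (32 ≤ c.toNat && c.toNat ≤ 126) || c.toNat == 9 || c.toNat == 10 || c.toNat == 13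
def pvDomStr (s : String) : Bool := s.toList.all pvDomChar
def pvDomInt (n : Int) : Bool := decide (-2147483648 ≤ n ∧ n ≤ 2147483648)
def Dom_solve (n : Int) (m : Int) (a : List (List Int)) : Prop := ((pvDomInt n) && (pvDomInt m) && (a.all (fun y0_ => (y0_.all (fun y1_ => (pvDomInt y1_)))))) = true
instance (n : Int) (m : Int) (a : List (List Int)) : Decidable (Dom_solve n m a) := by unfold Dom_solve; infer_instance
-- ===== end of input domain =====

-- B replaces A's build-table/column-sum/max phases by a single direct max over per-column-pair sums (same cost, simpler).

-- ===== PORT A =====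
-- inner 'while k < m: s.append(max(a[i][j], a[i][k])); k += 1'
def solveInner (row : List Int) (m j k : Int) (s : List Int) : List Int :=
  if k < m then
    solveInner row m j (k + 1) (s ++ [max (PySem.List.pyGetD row j 0) (PySem.List.pyGetD row k 0)])
  else s
termination_by (m - k).toNat
decreasing_by omega

-- outer 'while j < m-1: k = j+1; <inner>; j += 1'
def solveOuter (row : List Int) (m j : Int) (s : List Int) : List Int :=
  if j < m - 1 then
    solveOuter row m (j + 1) (solveInner row m j (j + 1) s)
  else s
termination_by (m - 1 - j).toNat
decreasing_by omega

def solve (n : Int) (m : Int) (a : List (List Int)) : Int :=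
  let s_n := (PySem.List.pyRange 0 n 1).foldl
      (fun acc i => acc ++ [solveOuter (PySem.List.pyGetD a i []) m 0 []]) []
  let L := (PySem.List.pyGetD s_n 0 []).length          -- len(s_n[0]); n ≤ 0 (empty s_n) is excluded by Pre_
  let s_2 := s_n.foldl
      (fun s2 s => (List.range L).foldl (fun t i => t.set i (t.getD i 0 + s.getD i 0)) s2)
      (List.replicate L (0 : Int))
  (PySem.List.max? s_2 (fun x => x)).getD 0             -- max(s_2); empty s_2 (m < 2) is excluded by Pre_

-- ===== PORT B =====
def solve_alt (n : Int) (m : Int) (a : List (List Int)) : Int :=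
  let totals := (PySem.List.pyRange 0 (m - 1) 1).flatMap (fun j =>
    (PySem.List.pyRange (j + 1) m 1).map (fun k =>
      (PySem.List.pyRange 0 n 1).foldl (fun acc i =>
        acc + max (PySem.List.pyGetD (PySem.List.pyGetD a i []) j 0)
                  (PySem.List.pyGetD (PySem.List.pyGetD a i []) k 0)) 0))
  (PySem.List.max? totals (fun x => x)).getD 0          -- max(totals); empty (m < 2) excluded by Pre_

-- ===== PRECONDITION & SPEC =====
-- Pre_ excludes exactly the inputs where Python A raises: n ≤ 0 (IndexError on s_n[0]),
-- m < 2 (ValueError on max([])), and out-of-range indexing a[i][j] (n > len(a) or a row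
-- among the first n shorter than m).
def Pre_solve (n : Int) (m : Int) (a : List (List Int)) : Prop :=
  1 ≤ n ∧ 2 ≤ m ∧ n ≤ a.length ∧ ∀ r ∈ a.take n.toNat, m ≤ r.length
instance (n : Int) (m : Int) (a : List (List Int)) : Decidable (Pre_solve n m a) := by
  unfold Pre_solve; infer_instance
def pvWitness_solve : Int × Int × List (List Int) := (1, 2, [[1, 2]])

def Spec_solve (n : Int) (m : Int) (a : List (List Int)) (out : Int) : Prop := out = solve_alt n m a
instance (n : Int) (m : Int) (a : List (List Int)) (out : Int) : Decidable (Spec_solve n m a out) := by unfold Spec_solve; infer_instance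

-- ===== CLAIM (what is proved, stated in full; the proofs are below) =====
def Claim_equal_solve : Prop := ∀ (n : Int) (m : Int) (a : List (List Int)), Dom_solve n m a → Pre_solve n m a → Spec_solve n m a (solve n m a)
-- ===== LEMMAS AND PROOFS =====

-- the ordered list of column pairs (j, k), j < k, that both programs traverse
def pairsP (m : Int) : List (Int × Int) :=
  (PySem.List.pyRange 0 (m - 1) 1).flatMap (fun j =>
    (PySem.List.pyRange (j + 1) m 1).map (fun k => (j, k)))

lemma solveInner_eq (row : List Int) (m j : Int) :
    ∀ (fuel : Nat) (k : Int) (s : List Int), fuel = (m - k).toNat →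
      solveInner row m j k s =
        s ++ (PySem.List.pyRange k m 1).map
          (fun k' => max (PySem.List.pyGetD row j 0) (PySem.List.pyGetD row k' 0)) := by
  intro fuel
  induction fuel with
  | zero =>
    intro k s hf
    have hk : ¬ k < m := by omega
    rw [solveInner, if_neg hk, PySem.List.pyRange_one_eq_nil (by omega)]
    simp
  | succ f ih =>
    intro k s hf
    by_cases hk : k < m
    · rw [solveInner, if_pos hk, ih (k + 1) _ (by omega),
        PySem.List.pyRange_one_cons hk]
      simp
    · rw [solveInner, if_neg hk, PySem.List.pyRange_one_eq_nil (by omega)]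
      simp

lemma solveOuter_eq (row : List Int) (m : Int) :
    ∀ (fuel : Nat) (j : Int) (s : List Int), fuel = (m - 1 - j).toNat →
      solveOuter row m j s =
        s ++ (PySem.List.pyRange j (m - 1) 1).flatMap
          (fun j' => (PySem.List.pyRange (j' + 1) m 1).map
            (fun k => max (PySem.List.pyGetD row j' 0) (PySem.List.pyGetD row k 0))) := by
  intro fuel
  induction fuel with
  | zero =>
    intro j s hf
    have hj : ¬ j < m - 1 := by omega
    rw [solveOuter, if_neg hj, PySem.List.pyRange_one_eq_nil (by omega)]
    simp
  | succ f ih =>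
    intro j s hf
    by_cases hj : j < m - 1
    · rw [solveOuter, if_pos hj, ih (j + 1) _ (by omega),
        solveInner_eq row m j ((m - (j + 1)).toNat) (j + 1) s rfl,
        PySem.List.pyRange_one_cons hj]
      simp
    · rw [solveOuter, if_neg hj, PySem.List.pyRange_one_eq_nil (by omega)]
      simp

-- A's row i of the table is the pair list mapped over pairsP
lemma row_eq_map_pairs (row : List Int) (m : Int) :
    solveOuter row m 0 [] =
      (pairsP m).map (fun p => max (PySem.List.pyGetD row p.1 0) (PySem.List.pyGetD row p.2 0)) := by
  rw [solveOuter_eq row m ((m - 1 - 0).toNat) 0 [] rfl, pairsP, List.map_flatMap]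
  simp [List.map_map, Function.comp_def]

lemma zipWith_add_map_map {β : Type} (P : List β) (h g : β → Int) :
    List.zipWith (· + ·) (P.map h) (P.map g) = P.map (fun p => h p + g p) := by
  induction P with
  | nil => rfl
  | cons p P ih => simp [ih]

-- the 'for i in range(L): s_2[i] += s[i]' loop is pointwise addition
lemma setfold_eq_zipWith :
    ∀ (s t0 : List Int), t0.length = s.length →
      (List.range s.length).foldl (fun t i => t.set i (t.getD i 0 + s.getD i 0)) t0 =
        List.zipWith (· + ·) t0 s := by
  have aux : ∀ (s' : List Int) (l : List Nat) (c : Int) (t : List Int),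
      l.foldl (fun t i => t.set (i + 1) (t.getD (i + 1) 0 + s'.getD i 0)) (c :: t) =
        c :: l.foldl (fun t i => t.set i (t.getD i 0 + s'.getD i 0)) t := by
    intro s' l
    induction l with
    | nil => intro c t; rfl
    | cons i l ih =>
      intro c t
      rw [List.foldl_cons, List.foldl_cons, List.set_cons_succ, List.getD_cons_succ]
      exact ih _ _
  intro s
  induction s with
  | nil =>
    intro t0 h
    rw [List.length_eq_zero_iff.mp h]
    rfl
  | cons x s ih =>
    intro t0 h
    match t0 with
    | c :: t =>
      rw [List.length_cons, List.range_succ_eq_map, List.foldl_cons, List.foldl_map]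
      simp only [List.set_cons_zero, List.getD_cons_zero, List.getD_cons_succ]
      rw [aux s, ih t (by simpa using h)]
      simp [List.zipWith_cons_cons]

-- the whole second phase of A, over rows that are maps over pairsP
lemma table_fold_eq {α β : Type} (g : α → β → Int) (P : List β) :
    ∀ (rs : List α) (h : β → Int),
      rs.foldl
        (fun t r => (List.range P.length).foldl
          (fun t i => t.set i (t.getD i 0 + ((P.map (g r)).getD i 0))) t)
        (P.map h) =
      P.map (fun p => h p + (rs.map (fun r => g r p)).sum) := by
  intro rs
  induction rs with
  | nil => intro h; simp
  | cons r rs ih =>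
    intro h
    rw [List.foldl_cons]
    have hlen : (P.map h).length = (P.map (g r)).length := by simp
    have := setfold_eq_zipWith (P.map (g r)) (P.map h) hlen
    rw [List.length_map] at this
    rw [this, zipWith_add_map_map, ih (fun p => h p + g r p)]
    simp [add_assoc]

-- ===== VERDICT (by name: the statement is the Claim_ definition above) =====
theorem solve_spec : Claim_equal_solve := by
  intro n m a _ hpre
  obtain ⟨hn, hm, -, -⟩ := hpre
  show solve n m a = solve_alt n m a
  unfold solve solve_alt
  rw [PySem.List.foldl_append_singleton_eq_map]
  simp only [List.nil_append]
  set g : Int → Int × Int → Int := fun i p =>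
    max (PySem.List.pyGetD (PySem.List.pyGetD a i []) p.1 0)
        (PySem.List.pyGetD (PySem.List.pyGetD a i []) p.2 0) with hg
  have hrow : ∀ i : Int, solveOuter (PySem.List.pyGetD a i []) m 0 [] =
      (pairsP m).map (g i) := fun i => row_eq_map_pairs _ m
  rw [show (fun i => solveOuter (PySem.List.pyGetD a i []) m 0 []) =
      (fun i => (pairsP m).map (g i)) from funext hrow]
  have hL : (PySem.List.pyGetD ((PySem.List.pyRange 0 n 1).map
      fun i => (pairsP m).map (g i)) 0 []).length = (pairsP m).length := by
    rw [PySem.List.pyRange_one_cons (show (0:Int) < n by omega)]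
    simp
  have hrep : List.replicate (pairsP m).length (0 : Int) =
      (pairsP m).map (fun _ => (0 : Int)) := by rw [List.map_const']
  rw [hL, hrep, List.foldl_map, table_fold_eq]
  congr 1
  rw [pairsP, List.map_flatMap]
  refine congrArg (fun l => PySem.List.max? l (fun x => x)) ?_
  apply congrArg (fun f => List.flatMap f (PySem.List.pyRange 0 (m - 1) 1))
  funext j
  rw [List.map_map]
  apply congrArg (fun f => List.map f (PySem.List.pyRange (j + 1) m 1))
  funext k
  rw [PySem.List.foldl_add]
  simp [hg]
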